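-- pv_equiv track=rewrite | github.com/LiXuanqi/leetcode-solutions | python3/1525.number-of-good-ways-to-split-a-string.py | numSplits
-- ===== SOURCE A (Python) =====
-- def numSplits(s: str) -> int:
--     distinct_letters_from_left = [0] * len(s)
--     distinct_letters_from_right = [0] * len(s)
--     character_set = set()
--     freq = 0
--     for index, c in enumerate(s):
--         character_set.add(c)
--         distinct_letters_from_left[index] = len(character_set)
--
--     character_set = set()
--     freq = 0
--     for index, c in enumerate(reversed(s)):
--         character_set.add(c)
--         distinct_letters_from_right[len(s)-index-1] = len(character_set)
--     ans = 0
--     for i in range(0, len(s)-1):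
--         if distinct_letters_from_left[i] == distinct_letters_from_right[i+1]:
--             ans += 1
--     return ans
-- ===== SOURCE B (Python) =====
-- def numSplits(s: str) -> int:
--     n = len(s)
--     return sum(1 for i in range(n - 1)
--                if len(set(s[:i + 1])) == len(set(s[i + 1:])))
-- ===== Notes on version B (the rewrite author's own statement) =====
-- stated objective: simpler
-- what changed: Replaced A's three loops over two precomputed distinct-count arrays by a single comprehension that, at each split point, directly compares the sizes of set(prefix) and set(suffix).
import Mathlib
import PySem

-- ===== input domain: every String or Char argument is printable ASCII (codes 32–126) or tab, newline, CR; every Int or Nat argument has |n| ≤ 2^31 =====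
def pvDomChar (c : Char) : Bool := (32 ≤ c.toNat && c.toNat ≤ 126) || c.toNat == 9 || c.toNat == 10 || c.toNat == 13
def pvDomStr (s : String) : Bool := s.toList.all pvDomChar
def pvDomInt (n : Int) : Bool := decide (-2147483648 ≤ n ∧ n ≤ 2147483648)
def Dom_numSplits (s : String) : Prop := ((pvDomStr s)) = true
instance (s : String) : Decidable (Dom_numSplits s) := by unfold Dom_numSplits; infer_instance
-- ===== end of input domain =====

-- B replaces A's three loops and two precomputed arrays by one direct comparison of
-- set-of-prefix / set-of-suffix sizes per split point (simpler; not faster: O(n^2) vs O(n)).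

-- ===== PORT A =====
def numSplits (s : String) : Int :=
  let l := s.toList
  let n := l.length
  let left0 : List Int := List.replicate n 0
  let right0 : List Int := List.replicate n 0
  let p1 := (PySem.List.enumerate l 0).foldl
      (fun (st : PySem.Set Char × List Int) ic =>
        let cs := PySem.Set.add st.1 ic.2
        (cs, PySem.List.pySetD st.2 ic.1 (cs.length : Int)))
      (PySem.Set.empty, left0)
  let left := p1.2
  let p2 := (PySem.List.enumerate l.reverse 0).foldl
      (fun (st : PySem.Set Char × List Int) ic =>
        let cs := PySem.Set.add st.1 ic.2
        (cs, PySem.List.pySetD st.2 ((n : Int) - ic.1 - 1) (cs.length : Int)))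
      (PySem.Set.empty, right0)
  let right := p2.2
  (PySem.List.pyRange 0 ((n : Int) - 1) 1).foldl
      (fun ans i =>
        if PySem.List.pyGetD left i 0 = PySem.List.pyGetD right (i + 1) 0 then ans + 1 else ans)
      0

-- ===== PORT B =====
def numSplits_alt (s : String) : Int :=
  let l := s.toList
  let n := (l.length : Int)
  (PySem.List.pyRange 0 (n - 1) 1).foldl
    (fun acc i =>
      if (PySem.Set.ofList (PySem.List.slice l none (some (i + 1)))).length
         = (PySem.Set.ofList (PySem.List.slice l (some (i + 1)) none)).length
      then acc + 1 else acc) 0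

-- ===== PRECONDITION & SPEC =====
def Spec_numSplits (s : String) (out : Int) : Prop := out = numSplits_alt s
instance (s : String) (out : Int) : Decidable (Spec_numSplits s out) := by unfold Spec_numSplits; infer_instance

-- ===== CLAIM (what is proved, stated in full; the proofs are below) =====
def Claim_equal_numSplits : Prop := ∀ (s : String), Dom_numSplits s → Spec_numSplits s (numSplits s)

-- ===== LEMMAS AND PROOFS =====

-- running prefix distinct-count list: pc cs t lists len(cs ∪ first k chars of t) for k = 1..|t|
def pc (cs : PySem.Set Char) : List Char → List Int
  | [] => []
  | c :: t => ((PySem.Set.add cs c).length : Int) :: pc (PySem.Set.add cs c) t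

theorem pc_length (cs : PySem.Set Char) (t : List Char) : (pc cs t).length = t.length := by
  induction t generalizing cs with
  | nil => rfl
  | cons c t ih => simp [pc, ih]

theorem pc_getElem (cs : PySem.Set Char) (t : List Char) (j : Nat) (hj : j < t.length) :
    (pc cs t)[j]'(by rw [pc_length]; exact hj)
      = (((t.take (j + 1)).foldl PySem.Set.add cs).length : Int) := by
  induction t generalizing cs j with
  | nil => simp at hj
  | cons c t ih =>
    cases j with
    | zero => simp [pc]
    | succ j => simpa [pc] using ih (PySem.Set.add cs c) j (by simpa using hj)

theorem take_set_succ {α : Type} (arr : List α) (k : Nat) (v : α) (hk : k < arr.length) :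
    (arr.set k v).take (k + 1) = arr.take k ++ [v] := by
  induction arr generalizing k with
  | nil => simp at hk
  | cons a arr ih =>
    cases k with
    | zero => simp
    | succ k => simp [List.set, List.take, ih k (by simpa using hk)]


theorem drop_set_self {α : Type} (arr : List α) (p : Nat) (v : α) (hp : p < arr.length) :
    (arr.set p v).drop p = v :: arr.drop (p + 1) := by
  induction arr generalizing p with
  | nil => simp at hp
  | cons a arr ih =>
    cases p with
    | zero => simp
    | succ p => simpa using ih p (by simpa using hp)

theorem fold1_arr (t : List Char) (cs : PySem.Set Char) (arr : List Int) (k : Int)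
    (hk : 0 ≤ k) (hlen : arr.length = k.toNat + t.length) :
    ((PySem.List.enumerate t k).foldl
        (fun (st : PySem.Set Char × List Int) ic =>
          (PySem.Set.add st.1 ic.2,
           PySem.List.pySetD st.2 ic.1 ((PySem.Set.add st.1 ic.2).length : Int)))
        (cs, arr)).2 = arr.take k.toNat ++ pc cs t := by
  induction t generalizing cs arr k with
  | nil =>
    simp only [PySem.List.enumerate_nil, List.foldl_nil, pc, List.append_nil]
    have h : arr.length = k.toNat := by simpa using hlen
    exact (List.take_of_length_le h.le).symm
  | cons c t ih =>
    rw [PySem.List.enumerate_cons]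
    simp only [List.foldl_cons]
    have hkn : k.toNat < arr.length := by simp at hlen; omega
    have htn : (k + 1).toNat = k.toNat + 1 := by omega
    rw [ih (PySem.Set.add cs c) _ (k + 1) (by omega)
        (by rw [PySem.List.pySetD_of_nonneg _ _ hk]; simp at hlen ⊢; omega)]
    rw [PySem.List.pySetD_of_nonneg _ _ hk, htn,
        take_set_succ arr k.toNat _ hkn]
    simp [pc]

theorem fold2_arr (n : Nat) (t : List Char) (cs : PySem.Set Char) (arr : List Int) (k : Int)
    (hk : 0 ≤ k) (harr : arr.length = n) (hle : k.toNat + t.length ≤ n) :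
    ((PySem.List.enumerate t k).foldl
        (fun (st : PySem.Set Char × List Int) ic =>
          (PySem.Set.add st.1 ic.2,
           PySem.List.pySetD st.2 ((n : Int) - ic.1 - 1) ((PySem.Set.add st.1 ic.2).length : Int)))
        (cs, arr)).2
      = arr.take (n - k.toNat - t.length) ++ (pc cs t).reverse ++ arr.drop (n - k.toNat) := by
  induction t generalizing cs arr k with
  | nil =>
    simp [PySem.List.enumerate_nil, pc, List.take_append_drop]
  | cons c t ih =>
    rw [PySem.List.enumerate_cons]
    simp only [List.foldl_cons]
    have hlt : k.toNat < n := by simp at hle; omega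
    have hpos : (0:Int) ≤ (n : Int) - k - 1 := by omega
    have hp : ((n : Int) - k - 1).toNat = n - k.toNat - 1 := by omega
    have hplt : n - k.toNat - 1 < arr.length := by omega
    rw [ih (PySem.Set.add cs c) _ (k + 1) (by omega)
        (by rw [PySem.List.pySetD_of_nonneg _ _ hpos]; simp [harr])
        (by simp at hle ⊢; omega)]
    rw [PySem.List.pySetD_of_nonneg _ _ hpos, hp]
    have h1 : (arr.set (n - k.toNat - 1) ((PySem.Set.add cs c).length : Int)).take
        (n - (k + 1).toNat - t.length) = arr.take (n - k.toNat - (c :: t).length) := by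
      have hc : (c :: t).length = t.length + 1 := rfl
      have hk1 : (k + 1).toNat = k.toNat + 1 := by omega
      have hx : n - (k + 1).toNat - t.length = n - k.toNat - (c :: t).length := by
        rw [hk1, hc]; omega
      rw [hx, List.take_set_of_le (by omega)]
    have h2 : (arr.set (n - k.toNat - 1) ((PySem.Set.add cs c).length : Int)).drop
        (n - (k + 1).toNat) = ((PySem.Set.add cs c).length : Int) :: arr.drop (n - k.toNat) := by
      have he : n - (k + 1).toNat = n - k.toNat - 1 := by omega
      have he2 : n - k.toNat - 1 + 1 = n - k.toNat := by omega
      rw [he, drop_set_self _ _ _ hplt, he2]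
    rw [h1, h2]
    simp [pc, List.append_assoc]

theorem ofList_length_congr (xs ys : List Char) (h : ∀ x, x ∈ xs ↔ x ∈ ys) :
    (PySem.Set.ofList xs).length = (PySem.Set.ofList ys).length := by
  refine List.Perm.length_eq ?_
  rw [List.perm_ext_iff_of_nodup (PySem.Set.nodup_ofList xs) (PySem.Set.nodup_ofList ys)]
  intro a
  rw [PySem.Set.mem_ofList, PySem.Set.mem_ofList]
  exact h a

-- at every split point the two final loops test the same condition
theorem cond_eq (l : List Char) (i : Int) (hi : 0 ≤ i) (hilt : i < (l.length : Int) - 1)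
    (acc : Int) :
    (if PySem.List.pyGetD (pc PySem.Set.empty l) i 0
        = PySem.List.pyGetD ((pc PySem.Set.empty l.reverse).reverse) (i + 1) 0
     then acc + 1 else acc)
    = (if (PySem.Set.ofList (PySem.List.slice l none (some (i + 1)))).length
          = (PySem.Set.ofList (PySem.List.slice l (some (i + 1)) none)).length
       then acc + 1 else acc) := by
  have hn : i.toNat + 1 < l.length := by omega
  have hi1 : ((i + 1).toNat) = i.toNat + 1 := by omega
  have hL : PySem.List.pyGetD (pc PySem.Set.empty l) i 0
      = ((PySem.Set.ofList (l.take (i.toNat + 1))).length : Int) := by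
    rw [PySem.List.pyGetD_eq_getElem _ _ hi (by rw [pc_length]; exact_mod_cast by omega),
        pc_getElem _ _ _ (by omega), PySem.Set.ofList_eq_foldl]
    rfl
  have hR : PySem.List.pyGetD ((pc PySem.Set.empty l.reverse).reverse) (i + 1) 0
      = ((PySem.Set.ofList (l.drop (i.toNat + 1))).length : Int) := by
    have hlen : ((pc PySem.Set.empty l.reverse).reverse).length = l.length := by
      simp [pc_length]
    rw [PySem.List.pyGetD_eq_getElem _ _ (by omega) (by rw [hlen]; exact_mod_cast by omega)]
    rw [List.getElem_reverse (by simp [pc_length, hi1]; omega)]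
    have hidx : (pc PySem.Set.empty l.reverse).length - 1 - (i + 1).toNat
        = l.length - 1 - (i.toNat + 1) := by simp [pc_length, hi1]
    rw [pc_getElem _ _ _ (by simp [pc_length] at hidx ⊢; omega)]
    have hfold : ∀ xs : List Char,
        List.foldl PySem.Set.add PySem.Set.empty xs = PySem.Set.ofList xs := fun xs => rfl
    rw [hfold, hidx]
    have htk : l.length - 1 - (i.toNat + 1) + 1 = l.length - (i.toNat + 1) := by omega
    rw [htk, List.take_reverse]
    have hj : l.length - (l.length - (i.toNat + 1)) = i.toNat + 1 := by omega
    rw [hj]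
    exact_mod_cast ofList_length_congr _ _ (by intro x; simp)
  rw [hL, hR,
      PySem.List.slice_to l (show (0:Int) ≤ i + 1 by omega),
      PySem.List.slice_from l (show (0:Int) ≤ i + 1 by omega), hi1]
  by_cases h : (PySem.Set.ofList (l.take (i.toNat + 1))).length
      = (PySem.Set.ofList (l.drop (i.toNat + 1))).length
  · rw [if_pos (by exact_mod_cast h), if_pos h]
  · rw [if_neg (by exact_mod_cast h), if_neg h]

-- ===== VERDICT (by name: the statement is the Claim_ definition above) =====
theorem numSplits_spec : Claim_equal_numSplits := by
  intro s _
  unfold Spec_numSplits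
  simp only [numSplits, numSplits_alt]
  rw [fold1_arr s.toList PySem.Set.empty _ 0 le_rfl (by simp)]
  rw [fold2_arr s.toList.length s.toList.reverse PySem.Set.empty _ 0 le_rfl (by simp) (by simp)]
  simp only [Int.toNat_zero, List.take_zero, Nat.sub_zero, List.length_reverse, Nat.sub_self,
    List.nil_append, List.drop_replicate, List.replicate_zero, List.append_nil]
  refine PySem.List.foldl_congr_mem _ _ _ _ ?_
  intro acc i hmem
  rw [PySem.List.mem_pyRange_one] at hmem
  exact cond_eq s.toList i hmem.1 hmem.2 acc
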